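-- pv_equiv track=rewrite | github.com/vladZ1nets/Myhomework | homework6_3.py | second_index
-- ===== SOURCE A (Python) =====
-- def second_index(text, some_str):
--     iter_count = 0
--     index = -1
--     while iter_count < 2:
--         index = text.find(some_str, index + 1)
--         if index == -1:
--             return None
--         iter_count += 1
--     return index
-- ===== SOURCE B (Python) =====
-- def second_index(text, some_str):
--     count = 0
--     n = len(some_str)
--     for i in range(len(text) + 1):
--         if text[i:i+n] == some_str:
--             count += 1
--             if count == 2:
--                 return i
--     return None
-- ===== Notes on version B (the rewrite author's own statement) =====
-- stated objective: alternative
-- what changed: B replaces A's two str.find library calls with one explicit left-to-right scan that compares the slice text[i:i+len(some_str)] at every position and keeps a running match counter, returning the position where the counter reaches 2.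
import Mathlib
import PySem

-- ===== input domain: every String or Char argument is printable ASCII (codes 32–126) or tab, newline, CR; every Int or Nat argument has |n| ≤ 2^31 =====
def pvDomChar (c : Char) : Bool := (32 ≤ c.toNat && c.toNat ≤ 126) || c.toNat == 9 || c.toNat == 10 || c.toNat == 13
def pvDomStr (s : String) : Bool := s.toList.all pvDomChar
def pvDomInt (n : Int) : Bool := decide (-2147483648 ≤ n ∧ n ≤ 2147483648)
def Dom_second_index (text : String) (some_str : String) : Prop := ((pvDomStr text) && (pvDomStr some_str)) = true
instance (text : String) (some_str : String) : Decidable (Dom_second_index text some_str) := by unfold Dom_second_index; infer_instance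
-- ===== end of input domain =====

-- B replaces A's two str.find calls with one explicit slice-comparing scan and a match counter (alternative decomposition; same cost).

-- ===== PORT A =====
-- the while loop of A: state (iter_count, index), runs while iter_count < 2
def secondIndexLoop (text : String) (some_str : String) (iterCount : Nat) (index : Int) :
    Option Int :=
  if iterCount < 2 then
    let index' := PySem.Str.findFrom text some_str (index + 1) none
    if index' = -1 then none
    else secondIndexLoop text some_str (iterCount + 1) index'
  else some index
termination_by 2 - iterCount

def second_index (text : String) (some_str : String) : Option Int :=
  secondIndexLoop text some_str 0 (-1)

-- ===== PORT B =====
-- Source B's for-loop over i in range(len(text)+1), carrying the match counter.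
-- '(t.drop i).take p.length = p' is exactly 'text[i:i+n] == some_str' (PySem.List.slice_natCast_add).
def altGo (t p : List Char) (i : Nat) (count : Nat) : Option Int :=
  if i ≤ t.length then
    if (t.drop i).take p.length = p then
      if count + 1 = 2 then some (i : Int)
      else altGo t p (i + 1) (count + 1)
    else altGo t p (i + 1) count
  else none
termination_by t.length + 1 - i

def second_index_alt (text : String) (some_str : String) : Option Int :=
  altGo text.toList some_str.toList 0 0

-- ===== PRECONDITION & SPEC =====
def Spec_second_index (text : String) (some_str : String) (out : Option Int) : Prop := out = second_index_alt text some_str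
instance (text : String) (some_str : String) (out : Option Int) : Decidable (Spec_second_index text some_str out) := by unfold Spec_second_index; infer_instance

-- ===== CLAIM (what is proved, stated in full; the proofs are below) =====
def Claim_equal_second_index : Prop := ∀ (text : String) (some_str : String), Dom_second_index text some_str → Spec_second_index text some_str (second_index text some_str)

-- ===== LEMMAS AND PROOFS =====

-- abstract "first match position ≥ i" used to mediate between the two programs
def firstFrom (t p : List Char) (i : Nat) : Option Nat :=
  if i ≤ t.length then
    if p <+: t.drop i then some i else firstFrom t p (i + 1)
  else none
termination_by t.length + 1 - i

theorem take_eq_iff_prefix (t p : List Char) (i : Nat) :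
    ((t.drop i).take p.length = p) ↔ p <+: t.drop i := by
  constructor
  · intro h; exact h ▸ List.take_prefix _ _
  · intro h; exact (List.prefix_iff_eq_take.mp h).symm

-- B with count = 1 computes the first match ≥ i
theorem altGo_one (t p : List Char) (i : Nat) :
    altGo t p i 1 = (firstFrom t p i).map (fun j => (j : Int)) := by
  fun_induction firstFrom t p i with
  | case1 i hle hpre =>
      rw [altGo]; simp [hle, (take_eq_iff_prefix t p i).mpr hpre]
  | case2 i hle hpre ih =>
      rw [altGo]; simp only [if_pos hle, if_neg (fun h => hpre ((take_eq_iff_prefix t p i).mp h))]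
      exact ih
  | case3 i hle =>
      rw [altGo]; simp [hle]

-- B with count = 0: find the first match, then continue with count = 1 just after it
theorem altGo_zero (t p : List Char) (i : Nat) :
    altGo t p i 0 = (firstFrom t p i).bind (fun j => altGo t p (j + 1) 1) := by
  fun_induction firstFrom t p i with
  | case1 i hle hpre =>
      rw [altGo]; simp [hle, (take_eq_iff_prefix t p i).mpr hpre]
  | case2 i hle hpre ih =>
      rw [altGo]; simp only [if_pos hle, if_neg (fun h => hpre ((take_eq_iff_prefix t p i).mp h))]
      exact ih
  | case3 i hle =>
      rw [altGo]; simp [hle]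

theorem firstFrom_eq_none (t p : List Char) (i : Nat)
    (h : ∀ j, i ≤ j → ¬ p <+: t.drop j) :
    firstFrom t p i = none := by
  fun_induction firstFrom t p i with
  | case1 i hle hpre => exact absurd hpre (h i le_rfl)
  | case2 i hle hpre ih => exact ih (fun j hj => h j (by omega))
  | case3 i hle => rfl

theorem firstFrom_eq_some (t p : List Char) (i m : Nat)
    (him : i ≤ m) (hml : m ≤ t.length) (hpre : p <+: t.drop m)
    (hmin : ∀ j, i ≤ j → j < m → ¬ p <+: t.drop j) :
    firstFrom t p i = some m := by
  fun_induction firstFrom t p i with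
  | case1 i hle hpre' =>
      have : i = m := by
        rcases Nat.lt_or_ge i m with h | h
        · exact absurd hpre' (hmin i le_rfl h)
        · omega
      simp [this]
  | case2 i hle hpre' ih =>
      have him' : i + 1 ≤ m := by
        rcases Nat.lt_or_ge i m with h | h
        · omega
        · have : i = m := by omega
          exact absurd (this ▸ hpre) hpre'
      exact ih him' (fun j hj hjm => hmin j (by omega) hjm)
  | case3 i hle => omega

-- a prefix of a later drop is an infix of an earlier drop
theorem infix_of_prefix_drop (t p : List Char) (k j : Nat) (hkj : k ≤ j)
    (h : p <+: t.drop j) : p <:+: t.drop k := by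
  have : t.drop j = (t.drop k).drop (j - k) := by
    rw [List.drop_drop]; congr 1; omega
  exact (this ▸ h).isInfix.trans (List.drop_suffix (j - k) (t.drop k)).isInfix

-- first match ≥ i, expressed through PySem.Chars.findFrom (for i ≤ length)
theorem firstFrom_eq_findFrom (t p : List Char) (i : Nat) (hi : i ≤ t.length) :
    firstFrom t p i =
      (if PySem.Chars.findFrom t p (i : Int) none = -1 then none
       else some (PySem.Chars.findFrom t p (i : Int) none).toNat) := by
  by_cases hneg : PySem.Chars.findFrom t p (i : Int) none = -1
  · rw [if_pos hneg]
    have hnin : ¬ p <:+: t.drop i :=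
      (PySem.Chars.findFrom_natCast_eq_neg_one_iff t p i hi).mp hneg
    refine firstFrom_eq_none t p i (fun j hj hpre => hnin ?_)
    exact infix_of_prefix_drop t p i j hj hpre
  · rw [if_neg hneg]
    obtain ⟨hik, hpre, hmin⟩ := PySem.Chars.findFrom_natCast_spec t p i hi hneg
    set r := PySem.Chars.findFrom t p (i : Int) none with hr
    have hr0 : (0 : Int) ≤ r := le_trans (by exact_mod_cast Nat.zero_le i) hik
    have hrlen : r ≤ (t.length : Int) := by
      rw [hr, PySem.Chars.findFrom_natCast t p i hi]
      split
      · omega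
      · have := PySem.Chars.find_le_length (t.drop i) p
        simp only [List.length_drop] at this
        omega
    refine firstFrom_eq_some t p i r.toNat (by omega) (by omega) hpre ?_
    intro j hj hjm
    exact hmin j (by exact_mod_cast hj) (by omega)

-- unfold A's loop: two iterations written out
theorem second_index_eq (text some_str : String) :
    second_index text some_str =
      (let f1 := PySem.Chars.find text.toList some_str.toList
       if f1 = -1 then none
       else
         let f2 := PySem.Chars.findFrom text.toList some_str.toList (f1 + 1) none
         if f2 = -1 then none else some f2) := by
  rw [second_index, secondIndexLoop]
  simp only [if_pos (by norm_num : (0:Nat) < 2), neg_add_cancel]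
  rw [secondIndexLoop]
  simp only [if_pos (by norm_num : (1:Nat) < 2)]
  rw [secondIndexLoop]
  simp only [if_neg (by norm_num : ¬ (2:Nat) < 2)]
  simp [PySem.Str.findFrom_eq, PySem.Chars.findFrom_zero]

-- the two programs agree, stated over the underlying character lists
theorem main_lists (T P : List Char) :
    (let f1 := PySem.Chars.find T P
     if f1 = -1 then none
     else
       let f2 := PySem.Chars.findFrom T P (f1 + 1) none
       if f2 = -1 then none else some f2) = altGo T P 0 0 := by
  rw [altGo_zero]
  by_cases h1 : PySem.Chars.find T P = -1
  · -- no first occurrence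
    have hnone : firstFrom T P 0 = none := by
      refine firstFrom_eq_none T P 0 (fun j _ hpre => ?_)
      exact (PySem.Chars.find_eq_neg_one_iff T P).mp h1
        (infix_of_prefix_drop T P 0 j (Nat.zero_le j) hpre)
    simp [h1, hnone]
  · -- first occurrence at f1
    have h0 : (0 : Int) ≤ PySem.Chars.find T P := by
      have := PySem.Chars.neg_one_le_find T P; omega
    obtain ⟨hpre1, hmin1⟩ := PySem.Chars.find_spec h0
    set f1 := PySem.Chars.find T P with hf1
    have hf1len : f1 ≤ (T.length : Int) := PySem.Chars.find_le_length T P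
    have hfirst0 : firstFrom T P 0 = some f1.toNat :=
      firstFrom_eq_some T P 0 f1.toNat (Nat.zero_le _) (by omega) hpre1
        (fun j _ hj => hmin1 j hj)
    simp only [if_neg h1, hfirst0, Option.bind_some]
    rw [altGo_one]
    have hcast : f1 + 1 = ((f1.toNat + 1 : Nat) : Int) := by omega
    by_cases hend : f1.toNat + 1 ≤ T.length
    · rw [hcast, firstFrom_eq_findFrom T P (f1.toNat + 1) hend]
      by_cases h2 : PySem.Chars.findFrom T P ((f1.toNat + 1 : Nat) : Int) none = -1
      · rw [h2]; simp
      · obtain ⟨hik, _, _⟩ :=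
          PySem.Chars.findFrom_natCast_spec T P (f1.toNat + 1) hend h2
        have hr0 : (0 : Int) ≤ PySem.Chars.findFrom T P ((f1.toNat + 1 : Nat) : Int) none :=
          le_trans (by exact_mod_cast Nat.zero_le (f1.toNat + 1)) hik
        rw [if_neg h2, if_neg h2]
        simp
        have hmx : max f1 0 + 1 = ((f1.toNat + 1 : Nat) : Int) := by omega
        rw [hmx]
        exact hr0
    · -- f1.toNat = T.length: the first match is at the very end, so P = [] and T = []
      have hTlen : f1.toNat = T.length := by omega
      have hP : P = [] := by
        have : T.drop f1.toNat = [] := by simp [hTlen]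
        simpa [this] using hpre1
      have hf10 : f1 = 0 := by rw [hf1, hP]; exact PySem.Chars.find_nil T
      have hT : T = [] := by
        cases T with
        | nil => rfl
        | cons c cs => exfalso; rw [hf10] at hTlen; simp at hTlen
      subst hP; subst hT
      have hff : PySem.Chars.findFrom ([] : List Char) ([] : List Char) (1 : Int) none = -1 := by
        decide
      rw [hf10]
      simp [firstFrom, hff]

-- ===== VERDICT (by name: the statement is the Claim_ definition above) =====
theorem second_index_spec : Claim_equal_second_index := by
  intro text some_str _
  unfold Spec_second_index second_index_alt
  rw [second_index_eq]
  exact main_lists text.toList some_str.toList
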